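-- pv_equiv track=rewrite | github.com/dercaft/XNAS | xnas/search_space/cell_based.py | _node_index
-- ===== SOURCE A (Python) =====
-- def _node_index(n_nodes, input_nodes=2, start_index=0):
--     node_index = []
--     start_index = start_index
--     end_index = input_nodes + start_index
--     for i in range(n_nodes):
--         node_index.append(list(range(start_index, end_index)))
--         start_index = end_index
--         end_index += input_nodes + i + 1
--     return node_index
-- ===== SOURCE B (Python) =====
-- def _node_index(n_nodes, input_nodes=2, start_index=0):
--     def start(i):
--         return start_index + i * input_nodes + i * (i - 1) // 2
--     return [list(range(start(i), start(i) + input_nodes + i)) for i in range(n_nodes)]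
-- ===== Notes on version B (the rewrite author's own statement) =====
-- stated objective: simpler
-- what changed: Replaces the loop threading start/end accumulators with a single comprehension computing each block's bounds by a closed form (start_index + i*input_nodes + i*(i-1)//2).
import Mathlib
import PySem

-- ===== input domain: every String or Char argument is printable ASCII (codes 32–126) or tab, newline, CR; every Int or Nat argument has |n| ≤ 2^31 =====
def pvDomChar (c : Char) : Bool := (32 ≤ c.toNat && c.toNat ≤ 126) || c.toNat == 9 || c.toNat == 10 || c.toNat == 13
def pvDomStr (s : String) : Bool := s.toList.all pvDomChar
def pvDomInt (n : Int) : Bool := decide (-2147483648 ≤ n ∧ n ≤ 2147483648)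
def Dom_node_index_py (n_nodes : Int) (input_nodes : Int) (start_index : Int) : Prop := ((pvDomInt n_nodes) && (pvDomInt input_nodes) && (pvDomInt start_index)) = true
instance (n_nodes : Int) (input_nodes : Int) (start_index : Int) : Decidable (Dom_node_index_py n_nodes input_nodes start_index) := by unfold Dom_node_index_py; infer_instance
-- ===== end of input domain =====

-- ===== PORT A =====
-- B replaces A's threaded start/end accumulators with a closed-form bound per block (simpler).
def node_index_py (n_nodes : Int) (input_nodes : Int) (start_index : Int) : List (List Int) :=
  -- node_index = []; end_index = input_nodes + start_index; for i in range(n_nodes): ...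
  (PySem.List.pyRange 0 n_nodes 1).foldl
    (fun st i =>
      let acc := st.1
      let s := st.2.1
      let e := st.2.2
      (acc ++ [PySem.List.pyRange s e 1], e, e + input_nodes + i + 1))
    ([], start_index, input_nodes + start_index)
  |>.1

-- ===== PORT B =====
def node_index_py_alt (n_nodes : Int) (input_nodes : Int) (start_index : Int) : List (List Int) :=
  (PySem.List.pyRange 0 n_nodes 1).map (fun i =>
    let s := start_index + i * input_nodes + PySem.Int.floordiv (i * (i - 1)) 2
    PySem.List.pyRange s (s + input_nodes + i) 1)

-- ===== PRECONDITION & SPEC =====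
def Spec_node_index_py (n_nodes : Int) (input_nodes : Int) (start_index : Int) (out : List (List Int)) : Prop := out = node_index_py_alt n_nodes input_nodes start_index
instance (n_nodes : Int) (input_nodes : Int) (start_index : Int) (out : List (List Int)) : Decidable (Spec_node_index_py n_nodes input_nodes start_index out) := by unfold Spec_node_index_py; infer_instance

-- ===== CLAIM =====
def Claim_equal_node_index_py : Prop := ∀ (n_nodes : Int) (input_nodes : Int) (start_index : Int), Dom_node_index_py n_nodes input_nodes start_index → Spec_node_index_py n_nodes input_nodes start_index (node_index_py n_nodes input_nodes start_index)

-- ===== LEMMAS AND PROOFS =====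

-- closed-form start offset of block i (as a function of i : Nat)
def pvStart (input_nodes start_index : Int) (n : Nat) : Int :=
  start_index + (n : Int) * input_nodes + PySem.Int.floordiv ((n : Int) * ((n : Int) - 1)) 2

lemma pvStart_succ (input_nodes start_index : Int) (n : Nat) :
    pvStart input_nodes start_index (n + 1)
      = pvStart input_nodes start_index n + input_nodes + n := by
  unfold pvStart
  rw [PySem.Int.floordiv_eq_ediv_of_pos (by norm_num),
      PySem.Int.floordiv_eq_ediv_of_pos (by norm_num)]
  have h : ((n : Int) + 1) * ((n : Int) + 1 - 1) = (n : Int) * ((n : Int) - 1) + (n : Int) * 2 := by ring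
  push_cast
  rw [h, Int.add_mul_ediv_right _ _ (by norm_num)]
  ring

lemma node_index_loop (input_nodes start_index : Int) (n : Nat) :
    (PySem.List.pyRange 0 (n : Int) 1).foldl
      (fun st i =>
        (st.1 ++ [PySem.List.pyRange st.2.1 st.2.2 1], st.2.2, st.2.2 + input_nodes + i + 1))
      ([], start_index, input_nodes + start_index)
    = ((PySem.List.pyRange 0 (n : Int) 1).map (fun i =>
        let s := start_index + i * input_nodes + PySem.Int.floordiv (i * (i - 1)) 2
        PySem.List.pyRange s (s + input_nodes + i) 1),
       pvStart input_nodes start_index n,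
       pvStart input_nodes start_index n + input_nodes + n) := by
  induction n with
  | zero =>
      simp [pvStart, PySem.Int.floordiv]
      omega
  | succ k ih =>
      have hk : (0 : Int) ≤ (k : Int) := Int.natCast_nonneg k
      have hsplit : PySem.List.pyRange 0 ((k : Int) + 1) 1
          = PySem.List.pyRange 0 (k : Int) 1 ++ [(k : Int)] :=
        PySem.List.pyRange_one_succ_right hk
      push_cast
      rw [hsplit, List.foldl_append, List.map_append, ih]
      have hs := pvStart_succ input_nodes start_index k
      simp only [List.foldl_cons, List.foldl_nil, List.map_cons, List.map_nil,
        Prod.mk.injEq]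
      rw [hs]
      simp only [pvStart]
      push_cast
      refine ⟨trivial, ?_, ?_⟩ <;> (try rfl); (try push_cast); (try ring)

-- ===== VERDICT =====
theorem node_index_py_spec : Claim_equal_node_index_py := by
  intro n_nodes input_nodes start_index _
  unfold Spec_node_index_py node_index_py node_index_py_alt
  rcases le_or_gt n_nodes 0 with h | h
  · rw [PySem.List.pyRange_one_eq_nil h]
    simp
  · obtain ⟨m, hm⟩ : ∃ m : Nat, n_nodes = (m : Int) :=
      ⟨n_nodes.toNat, (Int.toNat_of_nonneg h.le).symm⟩
    subst hm
    rw [node_index_loop]
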